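-- pv_equiv track=rewrite | github.com/xiaodongzheng-sys/Jira-Automation | bpmis_jira_tool/meeting_recorder.py | _preferred_microphone_input
-- ===== SOURCE A (Python) =====
-- def _preferred_microphone_input(audio_devices: list[str]) -> str:
--     for device in audio_devices:
--         name = str(device or "").strip()
--         lowered = name.lower()
--         if name and ("microphone" in lowered or lowered.endswith(" mic") or " mic " in lowered):
--             return name
--     for device in audio_devices:
--         name = str(device or "").strip()
--         lowered = name.lower()
--         if name and not _looks_like_system_audio_device(name) and "output" not in lowered:
--             return name
--     return ""
--
-- def _looks_like_system_audio_device(name: str) -> bool: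
--     lowered = str(name or "").strip().lower()
--     return any(token in lowered for token in ("blackhole", "soundflower", "loopback", "aggregate", "multi-output"))
-- ===== SOURCE B (Python) =====
-- def _preferred_microphone_input(audio_devices: list[str]) -> str:
--     # single full pass, no early return: track first microphone match and first
--     # acceptable fallback simultaneously; microphone winner takes priority.
--     mic = None
--     fallback = None
--     for device in audio_devices:
--         name = str(device or "").strip()
--         if not name:
--             continue
--         lowered = name.lower()
--         if mic is None and ("microphone" in lowered or lowered.endswith(" mic") or " mic " in lowered):
--             mic = name
--         if fallback is None and not _looks_like_system_audio_device(name) and "output" not in lowered: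
--             fallback = name
--     if mic is not None:
--         return mic
--     if fallback is not None:
--         return fallback
--     return ""
--
-- def _looks_like_system_audio_device(name: str) -> bool:
--     lowered = str(name or "").strip().lower()
--     return any(token in lowered for token in ("blackhole", "soundflower", "loopback", "aggregate", "multi-output"))
-- ===== Notes on version B (the rewrite author's own statement) =====
-- stated objective: alternative
-- what changed: B replaces A's two sequential early-return scans by one full pass that simultaneously accumulates the first microphone match and the first acceptable fallback, choosing between the two accumulators only after the whole list is traversed.
import Mathlib
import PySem

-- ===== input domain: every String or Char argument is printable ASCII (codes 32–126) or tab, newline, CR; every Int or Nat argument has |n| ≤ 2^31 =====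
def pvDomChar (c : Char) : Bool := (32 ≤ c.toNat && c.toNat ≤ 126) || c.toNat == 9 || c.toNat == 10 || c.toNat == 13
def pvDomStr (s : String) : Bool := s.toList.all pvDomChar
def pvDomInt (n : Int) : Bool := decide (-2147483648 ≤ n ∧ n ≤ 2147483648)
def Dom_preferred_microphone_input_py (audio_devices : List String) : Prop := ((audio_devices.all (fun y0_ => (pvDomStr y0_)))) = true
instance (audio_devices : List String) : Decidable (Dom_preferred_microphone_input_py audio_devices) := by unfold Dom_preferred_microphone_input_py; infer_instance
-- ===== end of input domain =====

-- B replaces A's two early-return scans by one full fold that accumulates the first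
-- microphone match and the first acceptable fallback together (objective: alternative).

-- ===== PORT A =====
def looksLikeSystemAudioDevice (name : String) : Bool :=
  let lowered := PySem.Str.lower (PySem.Str.strip name)
  ["blackhole", "soundflower", "loopback", "aggregate", "multi-output"].any
    (fun token => PySem.Str.isIn token lowered)

-- first for-loop of A: first device whose stripped name looks like a microphone
def loopA1 : List String → Option String
  | [] => none
  | device :: rest =>
    let name := PySem.Str.strip device
    let lowered := PySem.Str.lower name
    if (!(name == "")) && (PySem.Str.isIn "microphone" lowered
        || PySem.Str.endswith lowered " mic" || PySem.Str.isIn " mic " lowered)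
    then some name
    else loopA1 rest

-- second for-loop of A: first non-system, non-output device
def loopA2 : List String → Option String
  | [] => none
  | device :: rest =>
    let name := PySem.Str.strip device
    let lowered := PySem.Str.lower name
    if (!(name == "")) && (!(looksLikeSystemAudioDevice name))
        && (!(PySem.Str.isIn "output" lowered))
    then some name
    else loopA2 rest

def preferred_microphone_input_py (audio_devices : List String) : String :=
  match loopA1 audio_devices with
  | some name => name
  | none =>
    match loopA2 audio_devices with
    | some name => name
    | none => ""

-- ===== PORT B =====
-- B's predicates, on the already stripped name / its lowering
def pvIsMicLow (lowered : String) : Bool :=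
  PySem.Str.isIn "microphone" lowered || PySem.Str.endswith lowered " mic"
    || PySem.Str.isIn " mic " lowered

def pvIsFallback (name lowered : String) : Bool :=
  !looksLikeSystemAudioDevice name && !PySem.Str.isIn "output" lowered

-- one fold step over the state (first mic so far, first fallback so far)
def pvStep (st : Option String × Option String) (device : String) :
    Option String × Option String :=
  let name := PySem.Str.strip device
  if name == "" then st
  else
    let lowered := PySem.Str.lower name
    (if st.1.isNone && pvIsMicLow lowered then some name else st.1,
     if st.2.isNone && pvIsFallback name lowered then some name else st.2)

def preferred_microphone_input_py_alt (audio_devices : List String) : String :=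
  let st := audio_devices.foldl pvStep (none, none)
  match st.1 with
  | some mic => mic
  | none =>
    match st.2 with
    | some fallback => fallback
    | none => ""

-- ===== PRECONDITION & SPEC =====
def Spec_preferred_microphone_input_py (audio_devices : List String) (out : String) : Prop := out = preferred_microphone_input_py_alt audio_devices
instance (audio_devices : List String) (out : String) : Decidable (Spec_preferred_microphone_input_py audio_devices out) := by unfold Spec_preferred_microphone_input_py; infer_instance

-- ===== CLAIM (what is proved, stated in full; the proofs are below) =====
def Claim_equal_preferred_microphone_input_py : Prop := ∀ (audio_devices : List String), Dom_preferred_microphone_input_py audio_devices → Spec_preferred_microphone_input_py audio_devices (preferred_microphone_input_py audio_devices)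

-- ===== LEMMAS AND PROOFS =====

-- B's fold computes exactly (A's first loop result, A's second loop result),
-- with already-found components left untouched.
theorem foldl_pvStep_eq (xs : List String) : ∀ m f : Option String,
    xs.foldl pvStep (m, f) = (m.or (loopA1 xs), f.or (loopA2 xs)) := by
  induction xs with
  | nil => intro m f; cases m <;> cases f <;> simp [loopA1, loopA2]
  | cons d rest ih =>
    intro m f
    simp only [List.foldl_cons, pvStep, loopA1, loopA2, pvIsMicLow, pvIsFallback]
    cases m <;> cases f <;> split_ifs <;> simp_all

theorem preferred_microphone_input_py_spec : Claim_equal_preferred_microphone_input_py := by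
  intro xs _
  unfold Spec_preferred_microphone_input_py preferred_microphone_input_py preferred_microphone_input_py_alt
  rw [foldl_pvStep_eq]
  cases h1 : loopA1 xs <;> cases h2 : loopA2 xs <;> simp
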